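-- pv_equiv track=rewrite | github.com/rodrigo-rac2/leetCodePy | reverse-prefix-of-word.py | reversePrefix
-- ===== SOURCE A (Python) =====
-- def reversePrefix(word: str, ch: str) -> str:
--     stack = []
--     flag = False
--     for c in word:
--         stack.append(c)
--         if c == ch:
--             flag = True
--             break
--     if not flag: return word
--     if len(stack) == len(word): return word[::-1]
--     return ''.join(stack[::-1]) + word[len(stack):]
-- ===== SOURCE B (Python) =====
-- def reversePrefix(word: str, ch: str) -> str:
--     i = next((idx for idx, c in enumerate(word) if c == ch), -1)
--     if i == -1:
--         return word
--     return word[i::-1] + word[i+1:]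
-- ===== Notes on version B (the rewrite author's own statement) =====
-- stated objective: simpler
-- what changed: Replaces the stack-accumulating loop with break/flag and three-way return with a single index search followed by one slice expression word[i::-1] + word[i+1:].
import Mathlib
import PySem

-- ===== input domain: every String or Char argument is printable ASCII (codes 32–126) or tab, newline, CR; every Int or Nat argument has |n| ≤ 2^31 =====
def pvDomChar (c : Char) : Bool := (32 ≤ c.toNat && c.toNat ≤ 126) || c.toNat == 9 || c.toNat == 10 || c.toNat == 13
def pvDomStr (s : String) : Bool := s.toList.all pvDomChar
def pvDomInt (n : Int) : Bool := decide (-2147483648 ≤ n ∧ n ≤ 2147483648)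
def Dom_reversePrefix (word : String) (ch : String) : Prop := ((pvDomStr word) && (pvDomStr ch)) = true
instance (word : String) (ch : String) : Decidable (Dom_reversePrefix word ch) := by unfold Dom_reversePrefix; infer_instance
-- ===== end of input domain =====

-- B replaces A's stack-accumulating loop with break/flag and three-way return by a
-- single first-index search plus one slice expression (simpler decomposition, same cost).

-- ===== PORT A =====
-- the for-loop with break: accumulates `stack`, stops when c == ch (single-char string equality)
def revLoopA (chars : List Char) (stack : List Char) (ch : String) : List Char × Bool :=
  match chars with
  | [] => (stack, false)
  | c :: rest =>
    let stack' := stack ++ [c]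
    if String.mk [c] == ch then (stack', true) else revLoopA rest stack' ch

def reversePrefix (word : String) (ch : String) : String :=
  let r := revLoopA word.toList [] ch
  if !r.2 then word
  else if r.1.length == word.toList.length then String.mk word.toList.reverse  -- word[::-1]
  else String.mk (r.1.reverse ++ word.toList.drop r.1.length)  -- ''.join(stack[::-1]) + word[len(stack):]

-- ===== PORT B =====
def reversePrefix_alt (word : String) (ch : String) : String :=
  -- i = next((idx for idx, c in enumerate(word) if c == ch), -1); -1 ↦ none
  match List.findIdx? (fun c => String.mk [c] == ch) word.toList with
  | none => word
  | some i => String.mk ((word.toList.take (i+1)).reverse ++ word.toList.drop (i+1))  -- word[i::-1] + word[i+1:]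

-- ===== PRECONDITION & SPEC =====
def Spec_reversePrefix (word : String) (ch : String) (out : String) : Prop := out = reversePrefix_alt word ch
instance (word : String) (ch : String) (out : String) : Decidable (Spec_reversePrefix word ch out) := by unfold Spec_reversePrefix; infer_instance

-- ===== CLAIM (what is proved, stated in full; the proofs are below) =====
def Claim_equal_reversePrefix : Prop := ∀ (word : String) (ch : String), Dom_reversePrefix word ch → Spec_reversePrefix word ch (reversePrefix word ch)

-- ===== LEMMAS AND PROOFS =====

-- A's loop result, characterised by the first index at which c == ch
theorem revLoopA_eq (ch : String) (l acc : List Char) :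
    revLoopA l acc ch =
      match List.findIdx? (fun c => String.mk [c] == ch) l with
      | none => (acc ++ l, false)
      | some i => (acc ++ l.take (i+1), true) := by
  induction l generalizing acc with
  | nil => simp [revLoopA]
  | cons c rest ih =>
    simp only [revLoopA, List.findIdx?_cons]
    by_cases h : String.mk [c] == ch
    · simp [h]
    · simp only [h, Bool.false_eq_true, ite_false, ih]
      cases hf : List.findIdx? (fun c => String.mk [c] == ch) rest <;>
        simp [List.append_assoc]

-- ===== VERDICT (by name: the statement is the Claim_ definition above) =====
theorem reversePrefix_spec : Claim_equal_reversePrefix := by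
  intro word ch _
  unfold Spec_reversePrefix reversePrefix reversePrefix_alt
  rw [revLoopA_eq]
  cases hf : List.findIdx? (fun c => String.mk [c] == ch) word.toList with
  | none => simp
  | some i =>
    simp only [List.nil_append, Bool.not_true, Bool.false_eq_true, if_false]
    by_cases hlen : (word.toList.take (i+1)).length = word.toList.length
    · have hle : word.toList.length ≤ i + 1 := by
        have := List.length_take (l := word.toList) (i := i+1)
        omega
      have htake : word.toList.take (i+1) = word.toList := List.take_of_length_le hle
      have hdrop : word.toList.drop (i+1) = [] := List.drop_eq_nil_of_le hle
      simp [htake, hdrop]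
    · have h' := hlen
      rw [List.length_take] at h'
      have hmin : min (i+1) word.toList.length = i+1 := by omega
      simp only [beq_iff_eq, List.length_take, hmin]
      rw [if_neg (show ¬ i + 1 = word.toList.length by omega)]
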